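-- pv_equiv track=rewrite | github.com/Atadeno/PO-Flotte | POV6.py | deb_fin_paquet
-- ===== SOURCE A (Python) =====
-- def nombre_paquet(liste_interventions):
--     p = 0
--     i = 0
--     while (i<len(liste_interventions)):
--         while(i<len(liste_interventions) and liste_interventions[i] == []):
--             i+=1
--         while (i<len(liste_interventions) and liste_interventions[i] !=[]):
--             i+=1
--         p+=1
--     if liste_interventions[-1] == []:
--         return p-1
--     else:
--         return p
--
-- def deb_fin_paquet(liste_interventions):
--     n = nombre_paquet(liste_interventions)
--     paquets = []
--     p = 0
--     for k in range(n):
--         while(liste_interventions[p]==[]):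
--             p+=1
--         d=p
--         while(p<len(liste_interventions) and liste_interventions[p]!=[]):
--             p+=1
--         f=p
--         paquets.append((d,f))
--     return paquets
-- ===== SOURCE B (Python) =====
-- def deb_fin_paquet(liste_interventions):
--     paquets = []
--     start = None
--     for i, x in enumerate(liste_interventions):
--         if x and start is None:
--             start = i
--         elif not x and start is not None:
--             paquets.append((start, i))
--             start = None
--     if start is not None:
--         paquets.append((start, len(liste_interventions)))
--     return paquets
-- ===== Notes on version B (the rewrite author's own statement) =====
-- stated objective: simpler
-- what changed: Replaced A's two-phase count-then-extract (nombre_paquet precount followed by a k-indexed extraction loop with nested while-skips) by a single left-to-right pass that tracks the start of the current non-empty run and emits (start, i) at each run boundary.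
import Mathlib
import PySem

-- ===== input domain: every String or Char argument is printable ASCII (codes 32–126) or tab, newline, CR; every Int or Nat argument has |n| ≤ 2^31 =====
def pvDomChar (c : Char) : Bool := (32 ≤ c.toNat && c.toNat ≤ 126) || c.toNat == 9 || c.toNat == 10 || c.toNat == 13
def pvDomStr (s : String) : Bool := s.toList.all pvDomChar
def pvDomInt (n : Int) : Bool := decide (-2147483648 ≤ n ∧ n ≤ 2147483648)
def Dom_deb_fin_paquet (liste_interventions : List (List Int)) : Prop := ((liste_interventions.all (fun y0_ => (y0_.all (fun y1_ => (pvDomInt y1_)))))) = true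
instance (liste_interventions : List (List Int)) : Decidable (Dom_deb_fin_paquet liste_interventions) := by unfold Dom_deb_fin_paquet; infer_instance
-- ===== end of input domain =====

-- B replaces A's count-then-extract two-phase structure by one left-to-right pass
-- tracking the start of the current non-empty run (objective: simpler).

-- ===== PORT A =====

-- `while i < len(liste) and liste[i] == []: i += 1`
def skipE (xs : List (List Int)) (i : Nat) : Nat :=
  if i < xs.length ∧ xs.getD i [] = [] then skipE xs (i+1) else i
termination_by xs.length - i
decreasing_by omega

-- `while i < len(liste) and liste[i] != []: i += 1`
def skipNE (xs : List (List Int)) (i : Nat) : Nat :=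
  if i < xs.length ∧ xs.getD i [] ≠ [] then skipNE xs (i+1) else i
termination_by xs.length - i
decreasing_by omega

lemma skipE_ge (xs : List (List Int)) (i : Nat) : i ≤ skipE xs i := by
  fun_induction skipE xs i with
  | case1 i h ih => omega
  | case2 i h => omega

lemma skipNE_ge (xs : List (List Int)) (i : Nat) : i ≤ skipNE xs i := by
  fun_induction skipNE xs i with
  | case1 i h ih => omega
  | case2 i h => omega

lemma step_gt (xs : List (List Int)) (i : Nat) (h : i < xs.length) :
    i < skipNE xs (skipE xs i) := by
  by_cases he : xs.getD i [] = []
  · have h1 : skipE xs i = skipE xs (i+1) := by rw [skipE, if_pos ⟨h, he⟩]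
    rw [h1]
    have h3 := skipE_ge xs (i+1)
    have h4 := skipNE_ge xs (skipE xs (i+1))
    omega
  · have h1 : skipE xs i = i := by rw [skipE, if_neg (by intro hc; exact he hc.2)]
    have h2 : skipNE xs i = skipNE xs (i+1) := by rw [skipNE, if_pos ⟨h, he⟩]
    rw [h1, h2]
    have h3 := skipNE_ge xs (i+1)
    omega

-- outer while of nombre_paquet
def npLoop (xs : List (List Int)) (i p : Nat) : Nat :=
  if i < xs.length then npLoop xs (skipNE xs (skipE xs i)) (p+1) else p
termination_by xs.length - i
decreasing_by have := step_gt xs i (by omega); omega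

def nombre_paquet (xs : List (List Int)) : Nat :=
  let p := npLoop xs 0 0
  if PySem.List.pyGet? xs (-1) = some [] then p - 1 else p

-- `for k in range(n)` body of deb_fin_paquet
def dfLoop (xs : List (List Int)) (k p : Nat) (acc : List (Int × Int)) : List (Int × Int) :=
  match k with
  | 0 => acc
  | k+1 =>
    let d := skipE xs p
    let f := skipNE xs d
    dfLoop xs k f (acc ++ [((d : Int), (f : Int))])

def deb_fin_paquet (liste_interventions : List (List Int)) : List (Int × Int) :=
  dfLoop liste_interventions (nombre_paquet liste_interventions) 0 []

-- ===== PORT B =====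

-- single pass with current-run start; at the end of the list i = len(liste)
def bLoop (xs : List (List Int)) (i : Nat) (start : Option Nat) (acc : List (Int × Int)) :
    List (Int × Int) :=
  match xs with
  | [] =>
    match start with
    | some s => acc ++ [((s : Int), (i : Int))]
    | none => acc
  | x :: rest =>
    match start with
    | none => if x ≠ [] then bLoop rest (i+1) (some i) acc else bLoop rest (i+1) none acc
    | some s =>
      if x = [] then bLoop rest (i+1) none (acc ++ [((s : Int), (i : Int))])
      else bLoop rest (i+1) (some s) acc

def deb_fin_paquet_alt (liste_interventions : List (List Int)) : List (Int × Int) :=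
  bLoop liste_interventions 0 none []

-- ===== PRECONDITION & SPEC =====
-- Pre_ excludes only the empty list, on which A raises IndexError (liste_interventions[-1]).
def Pre_deb_fin_paquet (liste_interventions : List (List Int)) : Prop :=
  liste_interventions ≠ []
instance (liste_interventions : List (List Int)) : Decidable (Pre_deb_fin_paquet liste_interventions) := by unfold Pre_deb_fin_paquet; infer_instance

def pvWitness_deb_fin_paquet : List (List Int) := [[1], [], [2, 3]]

def Spec_deb_fin_paquet (liste_interventions : List (List Int)) (out : List (Int × Int)) : Prop := out = deb_fin_paquet_alt liste_interventions
instance (liste_interventions : List (List Int)) (out : List (Int × Int)) : Decidable (Spec_deb_fin_paquet liste_interventions out) := by unfold Spec_deb_fin_paquet; infer_instance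

-- ===== CLAIM (what is proved, stated in full; the proofs are below) =====
def Claim_equal_deb_fin_paquet : Prop := ∀ (liste_interventions : List (List Int)), Dom_deb_fin_paquet liste_interventions → Pre_deb_fin_paquet liste_interventions → Spec_deb_fin_paquet liste_interventions (deb_fin_paquet liste_interventions)


-- ===== LEMMAS AND PROOFS =====

lemma skipNE_succ (xs : List (List Int)) (i : Nat) (h : i < xs.length)
    (he : xs.getD i [] ≠ []) : skipNE xs i = skipNE xs (i+1) := by
  rw [skipNE, if_pos ⟨h, he⟩]

lemma skipNE_id (xs : List (List Int)) (i : Nat)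
    (h : ¬ (i < xs.length ∧ xs.getD i [] ≠ [])) : skipNE xs i = i := by
  rw [skipNE, if_neg h]

-- reference description of the runs from index i onward: (start, one-past-end) pairs
def runsFrom (xs : List (List Int)) (i : Nat) : List (Nat × Nat) :=
  if h : i < xs.length then
    if xs.getD i [] = [] then runsFrom xs (i+1)
    else (i, skipNE xs i) :: runsFrom xs (skipNE xs i)
  else []
termination_by xs.length - i
decreasing_by
  · omega
  · rename_i hne
    have h2 : skipNE xs i = skipNE xs (i+1) := skipNE_succ xs i h hne
    have := skipNE_ge xs (i+1)
    omega

lemma skipE_le (xs : List (List Int)) (i : Nat) (h : i ≤ xs.length) : skipE xs i ≤ xs.length := by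
  fun_induction skipE xs i with
  | case1 i hc ih => exact ih (by omega)
  | case2 i hc => omega

lemma skipNE_le (xs : List (List Int)) (i : Nat) (h : i ≤ xs.length) : skipNE xs i ≤ xs.length := by
  fun_induction skipNE xs i with
  | case1 i hc ih => exact ih (by omega)
  | case2 i hc => omega

lemma skipE_not_cond (xs : List (List Int)) (i : Nat) :
    ¬ (skipE xs i < xs.length ∧ xs.getD (skipE xs i) [] = []) := by
  fun_induction skipE xs i with
  | case1 i hc ih => exact ih
  | case2 i hc => exact hc

-- if skipE runs off the end starting below it, the last element is empty
lemma skipE_last_empty (xs : List (List Int)) (i : Nat) (h : i < xs.length)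
    (he : skipE xs i = xs.length) : xs.getD (xs.length - 1) [] = [] := by
  fun_induction skipE xs i with
  | case1 i hc ih =>
    by_cases h2 : i + 1 < xs.length
    · exact ih h2 he
    · have : i = xs.length - 1 := by omega
      rw [← this]; exact hc.2
  | case2 i hc => omega

-- if skipNE runs off the end starting below it on a non-empty element, the last element is non-empty
lemma skipNE_last_ne (xs : List (List Int)) (i : Nat) (h : i < xs.length)
    (hne : xs.getD i [] ≠ []) (hf : skipNE xs i = xs.length) :
    xs.getD (xs.length - 1) [] ≠ [] := by
  fun_induction skipNE xs i with
  | case1 i hc ih =>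
    by_cases h2 : i + 1 < xs.length
    · by_cases h3 : xs.getD (i+1) [] = []
      · exfalso
        have : skipNE xs (i+1) = i+1 := skipNE_id xs (i+1) (by intro hcc; exact hcc.2 h3)
        omega
      · exact ih h2 h3 hf
    · have : i = xs.length - 1 := by omega
      rw [← this]; exact hc.2
  | case2 i hc => omega

lemma runsFrom_nil (xs : List (List Int)) (i : Nat) (h : ¬ i < xs.length) :
    runsFrom xs i = [] := by rw [runsFrom, dif_neg h]

lemma runsFrom_empty (xs : List (List Int)) (i : Nat) (h : i < xs.length)
    (he : xs.getD i [] = []) : runsFrom xs i = runsFrom xs (i+1) := by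
  rw [runsFrom, dif_pos h, if_pos he]

lemma runsFrom_cons (xs : List (List Int)) (i : Nat) (h : i < xs.length)
    (he : xs.getD i [] ≠ []) :
    runsFrom xs i = (i, skipNE xs i) :: runsFrom xs (skipNE xs i) := by
  rw [runsFrom, dif_pos h, if_neg he]

lemma runsFrom_skipE (xs : List (List Int)) (i : Nat) :
    runsFrom xs (skipE xs i) = runsFrom xs i := by
  fun_induction skipE xs i with
  | case1 i hc ih => rw [ih, ← runsFrom_empty xs i hc.1 hc.2]
  | case2 i hc => rfl

-- the count computed by nombre_paquet's outer loop
lemma npLoop_eq (xs : List (List Int)) (i p : Nat) :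
    npLoop xs i p = p + (runsFrom xs i).length +
      (if i < xs.length ∧ xs.getD (xs.length - 1) [] = [] then 1 else 0) := by
  fun_induction npLoop xs i p with
  | case2 i p h =>
    rw [runsFrom_nil xs i h, if_neg (by intro hc; exact h hc.1)]
    simp
  | case1 i p h ih =>
    rw [ih]
    by_cases h1 : skipE xs i = xs.length
    · -- only empties from i on
      have hlast := skipE_last_empty xs i h h1
      have h2 : skipNE xs (xs.length) = xs.length := skipNE_id xs _ (by omega)
      rw [h1, h2]
      have hr : runsFrom xs i = runsFrom xs (xs.length) := by
        rw [← runsFrom_skipE xs i, h1]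
      rw [hr, runsFrom_nil xs (xs.length) (by omega)]
      rw [if_neg (by omega), if_pos ⟨h, hlast⟩]
      omega
    · have hle := skipE_le xs i (by omega)
      have hd : skipE xs i < xs.length := by omega
      have hne : xs.getD (skipE xs i) [] ≠ [] := by
        intro hc; exact skipE_not_cond xs i ⟨hd, hc⟩
      have hruns : runsFrom xs i = (skipE xs i, skipNE xs (skipE xs i)) ::
          runsFrom xs (skipNE xs (skipE xs i)) := by
        rw [← runsFrom_skipE xs i]; exact runsFrom_cons xs _ hd hne
      by_cases h3 : skipNE xs (skipE xs i) = xs.length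
      · have hlast := skipNE_last_ne xs (skipE xs i) hd hne h3
        rw [hruns, if_neg (by omega), runsFrom_nil xs _ (by omega),
          if_neg (by intro hc; exact hlast hc.2)]
        simp
      · have := skipNE_ge xs (skipE xs i)
        have h4 := skipNE_le xs (skipE xs i) (by omega)
        have hlt : skipNE xs (skipE xs i) < xs.length := by omega
        rw [hruns]
        simp only [List.length_cons]
        by_cases h5 : xs.getD (xs.length - 1) [] = []
        · rw [if_pos ⟨hlt, h5⟩, if_pos ⟨h, h5⟩]; omega
        · rw [if_neg (by intro hc; exact h5 hc.2), if_neg (by intro hc; exact h5 hc.2)]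
          omega

-- the extraction loop produces exactly the runs, given the right count
lemma dfLoop_eq (xs : List (List Int)) (k : Nat) :
    ∀ p acc, p ≤ xs.length → k = (runsFrom xs p).length →
      dfLoop xs k p acc = acc ++ (runsFrom xs p).map (fun df => ((df.1 : Int), (df.2 : Int))) := by
  induction k with
  | zero =>
    intro p acc hp hk
    have : runsFrom xs p = [] := List.eq_nil_of_length_eq_zero hk.symm
    simp [dfLoop, this]
  | succ k ih =>
    intro p acc hp hk
    have hle := skipE_le xs p hp
    have hd : skipE xs p < xs.length := by
      rcases Nat.lt_or_ge (skipE xs p) xs.length with h | h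
      · exact h
      · exfalso
        have h1 : skipE xs p = xs.length := by omega
        have : runsFrom xs p = [] := by
          rw [← runsFrom_skipE xs p, h1, runsFrom_nil xs _ (by omega)]
        rw [this] at hk; simp at hk
    have hne : xs.getD (skipE xs p) [] ≠ [] := by
      intro hc; exact skipE_not_cond xs p ⟨hd, hc⟩
    have hruns : runsFrom xs p = (skipE xs p, skipNE xs (skipE xs p)) ::
        runsFrom xs (skipNE xs (skipE xs p)) := by
      rw [← runsFrom_skipE xs p]; exact runsFrom_cons xs _ hd hne
    have hf := skipNE_le xs (skipE xs p) (by omega)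
    rw [dfLoop]
    rw [ih (skipNE xs (skipE xs p)) _ hf (by rw [hruns] at hk; simpa using hk)]
    rw [hruns]
    simp

-- B's single pass produces the runs (for both states of `start`)
lemma bLoop_eq (xs : List (List Int)) : ∀ (ys : List (List Int)) (i : Nat),
    ys = xs.drop i → i ≤ xs.length →
    (∀ acc, bLoop ys i none acc =
        acc ++ (runsFrom xs i).map (fun df => ((df.1 : Int), (df.2 : Int)))) ∧
    (∀ s acc, bLoop ys i (some s) acc =
        acc ++ ((s : Int), ((skipNE xs i : Nat) : Int)) ::
          (runsFrom xs (skipNE xs i)).map (fun df => ((df.1 : Int), (df.2 : Int)))) := by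
  intro ys
  induction ys with
  | nil =>
    intro i hdrop hle
    have hi : i = xs.length := by
      have := List.drop_eq_nil_iff.mp hdrop.symm
      omega
    have hsk : skipNE xs i = i := skipNE_id xs i (by omega)
    constructor
    · intro acc; rw [runsFrom_nil xs i (by omega)]; simp [bLoop]
    · intro s acc
      rw [hsk, runsFrom_nil xs i (by omega)]
      simp [bLoop, hi]
  | cons x rest ih =>
    intro i hdrop hle
    have hi : i < xs.length := by
      by_contra h
      rw [List.drop_eq_nil_iff.mpr (by omega)] at hdrop
      exact List.cons_ne_nil x rest hdrop
    have hx : xs.getD i [] = x := by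
      have := List.drop_eq_getElem_cons hi
      rw [this] at hdrop
      have : x = xs[i] := by injection hdrop
      rw [this, List.getD_eq_getElem xs [] hi]
    have hrest : rest = xs.drop (i+1) := by
      have := List.drop_eq_getElem_cons hi
      rw [this] at hdrop
      injection hdrop
    have IH := ih (i+1) hrest (by omega)
    constructor
    · intro acc
      by_cases hxe : x = []
      · rw [runsFrom_empty xs i hi (by rw [hx, hxe]), bLoop]
        simp only [hxe, ne_eq, not_true_eq_false, if_false]
        exact IH.1 acc
      · have hsk : skipNE xs i = skipNE xs (i+1) :=
          skipNE_succ xs i hi (by rw [hx]; exact hxe)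
        rw [runsFrom_cons xs i hi (by rw [hx]; exact hxe), bLoop]
        simp only [hxe, ne_eq, not_false_iff, if_true]
        rw [IH.2 i acc, hsk]
        simp
    · intro s acc
      by_cases hxe : x = []
      · have hsk : skipNE xs i = i := skipNE_id xs i (by rw [hx, hxe]; simp)
        rw [bLoop]
        simp only [hxe, if_true]
        rw [IH.1 (acc ++ [((s : Int), (i : Int))]), hsk,
          runsFrom_empty xs i hi (by rw [hx, hxe])]
        simp
      · have hsk : skipNE xs i = skipNE xs (i+1) :=
          skipNE_succ xs i hi (by rw [hx]; exact hxe)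
        rw [bLoop]
        simp only [hxe, if_false]
        rw [IH.2 s acc, hsk]

lemma nombre_paquet_eq (xs : List (List Int)) (h : xs ≠ []) :
    nombre_paquet xs = (runsFrom xs 0).length := by
  have hlen : 0 < xs.length := List.length_pos_iff.mpr h
  have hget : PySem.List.pyGet? xs (-1) = xs.getLast? := PySem.List.pyGet?_neg_one xs
  have hlast : xs.getLast? = some (xs.getD (xs.length - 1) []) := by
    rw [List.getLast?_eq_getElem?, List.getElem?_eq_getElem (by omega),
      List.getD_eq_getElem xs [] (by omega)]
  unfold nombre_paquet
  rw [npLoop_eq xs 0 0, hget, hlast]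
  by_cases he : xs.getD (xs.length - 1) [] = []
  · rw [if_pos (by rw [he]), if_pos ⟨hlen, he⟩]
    omega
  · rw [if_neg (by intro hc; exact he (by injection hc)),
      if_neg (by intro hc; exact he hc.2)]
    omega

-- ===== VERDICT (by name: the statement is the Claim_ definition above) =====
theorem deb_fin_paquet_spec : Claim_equal_deb_fin_paquet := by
  intro xs _ hpre
  unfold Spec_deb_fin_paquet deb_fin_paquet deb_fin_paquet_alt
  rw [nombre_paquet_eq xs hpre,
    dfLoop_eq xs (runsFrom xs 0).length 0 [] (by omega) rfl,
    (bLoop_eq xs xs 0 (by simp) (by omega)).1 []]
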